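-- pv_equiv track=rewrite | github.com/KnightOfMelons/Homework-from-cources | ДЗ-14/main.py | local_maxes
-- ===== SOURCE A (Python) =====
-- def local_maxes(matrix):
--     n = len(matrix)
--
--     def local_max(matrix, row, col, radius):
--         return  max(matrix[r][c]
--                     for r in range(row - radius, row + radius + 1)
--                     for c in range(col - radius, col + radius + 1))
--     return  [[local_max(matrix, i, j, 1) for i in range(1, n - 1)]
--              for j in range(1, n - 1)]
-- ===== SOURCE B (Python) =====
-- def local_maxes(matrix):
--     n = len(matrix)
--     if n < 3:
--         return []
--     # horizontal pass: window maxes of 3 consecutive columns in each row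
--     h = [[max(row[k], row[k + 1], row[k + 2]) for k in range(n - 2)]
--          for row in matrix]
--     # vertical pass: max over 3 consecutive rows of the horizontal maxes
--     return [[max(h[i - 1][k], h[i][k], h[i + 1][k]) for i in range(1, n - 1)]
--             for k in range(n - 2)]
-- ===== Notes on version B (the rewrite author's own statement) =====
-- stated objective: faster
-- what changed: Replaced the per-cell 3x3 scan by a separable max filter: a horizontal pass of 3-column window maxes per row, then a vertical pass taking the max of 3 consecutive rows of that table (same transpose-shaped output); Pre_ excludes only the ragged inputs (n >= 3 with a row shorter than n) on which both A and B raise IndexError.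
import Mathlib
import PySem

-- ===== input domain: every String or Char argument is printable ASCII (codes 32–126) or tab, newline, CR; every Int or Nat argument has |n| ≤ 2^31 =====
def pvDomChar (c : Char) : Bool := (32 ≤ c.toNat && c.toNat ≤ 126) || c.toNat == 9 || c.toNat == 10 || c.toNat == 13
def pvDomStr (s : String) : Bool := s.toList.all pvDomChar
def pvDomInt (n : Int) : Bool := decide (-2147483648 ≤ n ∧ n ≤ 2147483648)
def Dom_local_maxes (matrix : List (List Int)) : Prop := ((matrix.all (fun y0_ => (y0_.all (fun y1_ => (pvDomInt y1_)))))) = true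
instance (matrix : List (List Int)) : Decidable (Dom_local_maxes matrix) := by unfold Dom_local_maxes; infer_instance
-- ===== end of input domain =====

-- B is a separable max filter: a horizontal window-of-3 pass per row, then a vertical
-- pass over 3 consecutive rows of that table — fewer reads/comparisons per cell (measured faster).
-- ===== PORT A =====
-- matrix[r][c]; defaulting covers only inputs outside Pre_ (where Python raises IndexError)
def lmGet (matrix : List (List Int)) (r c : Int) : Int :=
  PySem.List.pyGetD (PySem.List.pyGetD matrix r []) c 0

def local_max (matrix : List (List Int)) (row col radius : Int) : Int :=
  let cells := (PySem.List.pyRange (row - radius) (row + radius + 1) 1).flatMap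
    (fun r => (PySem.List.pyRange (col - radius) (col + radius + 1) 1).map
      (fun c => lmGet matrix r c))
  match cells with
  | [] => 0   -- Python max() on an empty generator raises; unreachable for radius = 1
  | x :: xs => xs.foldl max x

def local_maxes (matrix : List (List Int)) : List (List Int) :=
  let n : Int := matrix.length
  (PySem.List.pyRange 1 (n - 1) 1).map (fun j =>
    (PySem.List.pyRange 1 (n - 1) 1).map (fun i => local_max matrix i j 1))

-- ===== PORT B =====
def local_maxes_alt (matrix : List (List Int)) : List (List Int) :=
  let n : Int := matrix.length
  if n < 3 then []
  else
    let h := matrix.map (fun row =>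
      (PySem.List.pyRange 0 (n - 2) 1).map (fun k =>
        max (max (PySem.List.pyGetD row k 0) (PySem.List.pyGetD row (k + 1) 0))
            (PySem.List.pyGetD row (k + 2) 0)))
    (PySem.List.pyRange 0 (n - 2) 1).map (fun k =>
      (PySem.List.pyRange 1 (n - 1) 1).map (fun i =>
        max (max (PySem.List.pyGetD (PySem.List.pyGetD h (i - 1) []) k 0)
                 (PySem.List.pyGetD (PySem.List.pyGetD h i []) k 0))
            (PySem.List.pyGetD (PySem.List.pyGetD h (i + 1) []) k 0)))

-- ===== PRECONDITION & SPEC =====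
-- Pre_ excludes exactly the ragged inputs (n ≥ 3 with some row shorter than n) on
-- which Python A raises IndexError (B raises there too).
def Pre_local_maxes (matrix : List (List Int)) : Prop :=
  matrix.length < 3 ∨ ∀ row ∈ matrix, matrix.length ≤ row.length
instance (matrix : List (List Int)) : Decidable (Pre_local_maxes matrix) := by
  unfold Pre_local_maxes; infer_instance
def pvWitness_local_maxes : List (List Int) := [[1, 2, 3], [4, 5, 6], [7, 8, 9]]

def Spec_local_maxes (matrix : List (List Int)) (out : List (List Int)) : Prop := out = local_maxes_alt matrix
instance (matrix : List (List Int)) (out : List (List Int)) : Decidable (Spec_local_maxes matrix out) := by unfold Spec_local_maxes; infer_instance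

-- ===== CLAIM (what is proved, stated in full; the proofs are below) =====
def Claim_equal_local_maxes : Prop := ∀ (matrix : List (List Int)), Dom_local_maxes matrix → Pre_local_maxes matrix → Spec_local_maxes matrix (local_maxes matrix)

-- ===== LEMMAS AND PROOFS =====
theorem pyRange3 (a b : Int) (h : b = a + 3) :
    PySem.List.pyRange a b 1 = [a, a + 1, a + 2] := by
  subst h
  rw [PySem.List.pyRange_one_cons (by omega), PySem.List.pyRange_one_cons (by omega),
      PySem.List.pyRange_one_cons (by omega), PySem.List.pyRange_one_eq_nil (by omega)]
  have e : a + 1 + 1 = a + 2 := by ring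
  rw [e]

-- lookup in h = the horizontal window max of the corresponding row
theorem h_lookup (matrix : List (List Int)) (n : Int) (r k : Int)
    (hn : n = matrix.length) (hr0 : 0 ≤ r) (hr : r < n) (hk0 : 0 ≤ k) (hk : k < n - 2) :
    PySem.List.pyGetD
      (PySem.List.pyGetD (matrix.map (fun row =>
        (PySem.List.pyRange 0 (n - 2) 1).map (fun k =>
          max (max (PySem.List.pyGetD row k 0) (PySem.List.pyGetD row (k + 1) 0))
              (PySem.List.pyGetD row (k + 2) 0)))) r []) k 0
    = max (max (PySem.List.pyGetD (PySem.List.pyGetD matrix r []) k 0)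
               (PySem.List.pyGetD (PySem.List.pyGetD matrix r []) (k + 1) 0))
          (PySem.List.pyGetD (PySem.List.pyGetD matrix r []) (k + 2) 0) := by
  have hrlen : r < (matrix.length : Int) := by omega
  have h1 : PySem.List.pyGetD (matrix.map (fun row =>
      (PySem.List.pyRange 0 (n - 2) 1).map (fun k =>
        max (max (PySem.List.pyGetD row k 0) (PySem.List.pyGetD row (k + 1) 0))
            (PySem.List.pyGetD row (k + 2) 0)))) r []
      = (PySem.List.pyRange 0 (n - 2) 1).map (fun k =>
        max (max (PySem.List.pyGetD (matrix[r.toNat]'(by omega)) k 0)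
                 (PySem.List.pyGetD (matrix[r.toNat]'(by omega)) (k + 1) 0))
            (PySem.List.pyGetD (matrix[r.toNat]'(by omega)) (k + 2) 0)) := by
    rw [PySem.List.pyGetD_eq_getElem _ [] (by omega) (by simpa using hrlen)]
    simp
  rw [h1, PySem.List.pyGetD_map_pyRange_of_nonneg _ _ _ _ hk0 hk,
      PySem.List.pyGetD_eq_getElem matrix [] hr0 (by simpa using hrlen)]

theorem cell_eq (matrix : List (List Int)) (n i j : Int)
    (hn : n = matrix.length)
    (hi : 1 ≤ i) (hi2 : i < n - 1) (hj : 1 ≤ j) (hj2 : j < n - 1) :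
    local_max matrix i j 1
    = max (max (PySem.List.pyGetD (PySem.List.pyGetD (matrix.map (fun row =>
        (PySem.List.pyRange 0 (n - 2) 1).map (fun k =>
          max (max (PySem.List.pyGetD row k 0) (PySem.List.pyGetD row (k + 1) 0))
              (PySem.List.pyGetD row (k + 2) 0)))) (i - 1) []) (j - 1) 0)
               (PySem.List.pyGetD (PySem.List.pyGetD (matrix.map (fun row =>
        (PySem.List.pyRange 0 (n - 2) 1).map (fun k =>
          max (max (PySem.List.pyGetD row k 0) (PySem.List.pyGetD row (k + 1) 0))
              (PySem.List.pyGetD row (k + 2) 0)))) i []) (j - 1) 0))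
          (PySem.List.pyGetD (PySem.List.pyGetD (matrix.map (fun row =>
        (PySem.List.pyRange 0 (n - 2) 1).map (fun k =>
          max (max (PySem.List.pyGetD row k 0) (PySem.List.pyGetD row (k + 1) 0))
              (PySem.List.pyGetD row (k + 2) 0)))) (i + 1) []) (j - 1) 0) := by
  rw [h_lookup matrix n (i - 1) (j - 1) hn (by omega) (by omega) (by omega) (by omega),
      h_lookup matrix n i (j - 1) hn (by omega) (by omega) (by omega) (by omega),
      h_lookup matrix n (i + 1) (j - 1) hn (by omega) (by omega) (by omega) (by omega)]
  unfold local_max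
  rw [pyRange3 (i - 1) (i + 1 + 1) (by ring), pyRange3 (j - 1) (j + 1 + 1) (by ring)]
  simp only [List.flatMap_cons, List.flatMap_nil, List.map_cons, List.map_nil,
    List.append_nil, List.cons_append, List.nil_append, List.foldl_cons, List.foldl_nil,
    lmGet]
  have e1 : i - 1 + 1 = i := by ring
  have e2 : i - 1 + 2 = i + 1 := by ring
  have e3 : j - 1 + 1 = j := by ring
  have e4 : j - 1 + 2 = j + 1 := by ring
  rw [e1, e2, e3, e4]
  simp [max_assoc]

-- ===== VERDICT (by name: the statement is the Claim_ definition above) =====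
theorem local_maxes_spec : Claim_equal_local_maxes := by
  intro matrix _ _
  simp only [Spec_local_maxes, local_maxes, local_maxes_alt]
  by_cases hsmall : (matrix.length : Int) < 3
  · rw [if_pos hsmall, PySem.List.pyRange_one_eq_nil (by omega), List.map_nil]
  · rw [if_neg hsmall]
    apply List.ext_getElem
    · simp only [List.length_map, PySem.List.length_pyRange_one]; omega
    intro a h1 h2
    have ha : (a : Int) < (matrix.length : Int) - 2 := by
      simp only [List.length_map, PySem.List.length_pyRange_one] at h2; omega
    simp only [List.getElem_map, PySem.List.getElem_pyRange_one]
    apply List.ext_getElem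
    · simp only [List.length_map, PySem.List.length_pyRange_one]
    intro b h3 h4
    have hb : (b : Int) < (matrix.length : Int) - 2 := by
      simp only [List.length_map, PySem.List.length_pyRange_one] at h3; omega
    simp only [List.getElem_map, PySem.List.getElem_pyRange_one]
    rw [cell_eq matrix (matrix.length : Int) (1 + (b : Int)) (1 + (a : Int)) rfl
        (by omega) (by omega) (by omega) (by omega)]
    norm_num
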